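-- pv_equiv track=rewrite | github.com/bingdongni/PaperAgent | paperagent/tools/latex_advanced.py | create_multirow_table
-- ===== SOURCE A (Python) =====
-- from typing import Dict, Any, List, Optional, Tuple
--
-- def create_multirow_table(
--
--     data: List[List[Any]],
--     headers: List[str],
--     merge_cells: List[Tuple[int, int, int, int]],  # (row, col, rowspan, colspan)
--     caption: str,
--     label: str
-- ) -> str:
--     """
--     Create table with merged cells
--
--     Args:
--         data: Table data
--         headers: Column headers
--         merge_cells: List of cells to merge (row, col, rowspan, colspan)
--         caption: Table caption
--         label: Table label
--
--     Returns:
--         LaTeX table with multirow/multicolumn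
--     """
--     num_cols = len(headers)
--     latex = []
--
--     latex.append("\\begin{table}[htbp]\n")
--     latex.append("  \\centering\n")
--     latex.append(f"  \\caption{{{caption}}}\n")
--     latex.append(f"  \\label{{tab:{label}}}\n")
--     latex.append(f"  \\begin{{tabular}}{{{'|'.join(['c'] * num_cols)}}}\n")
--     latex.append("    \\hline\n")
--
--     # Headers
--     latex.append("    " + " & ".join(headers) + " \\\\\n")
--     latex.append("    \\hline\n")
--
--     # Process merge information
--     merged_positions = set()
--     for row, col, rowspan, colspan in merge_cells:
--         for r in range(row, row + rowspan):
--             for c in range(col, col + colspan):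
--                 if (r, c) != (row, col):
--                     merged_positions.add((r, c))
--
--     # Data rows
--     for row_idx, row in enumerate(data):
--         row_latex = []
--         for col_idx, cell in enumerate(row):
--             if (row_idx, col_idx) in merged_positions:
--                 continue
--
--             # Check if this cell should be merged
--             merge_info = None
--             for r, c, rs, cs in merge_cells:
--                 if r == row_idx and c == col_idx:
--                     merge_info = (rs, cs)
--                     break
--
--             if merge_info:
--                 rowspan, colspan = merge_info
--                 if rowspan > 1 and colspan > 1:
--                     cell_str = f"\\multirow{{{rowspan}}}{{*}}{{\\multicolumn{{{colspan}}}{{c}}{{{cell}}}}}"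
--                 elif rowspan > 1:
--                     cell_str = f"\\multirow{{{rowspan}}}{{*}}{{{cell}}}"
--                 elif colspan > 1:
--                     cell_str = f"\\multicolumn{{{colspan}}}{{c}}{{{cell}}}"
--                 else:
--                     cell_str = str(cell)
--             else:
--                 cell_str = str(cell)
--
--             row_latex.append(cell_str)
--
--         latex.append("    " + " & ".join(row_latex) + " \\\\\n")
--         latex.append("    \\hline\n")
--
--     latex.append("  \\end{tabular}\n")
--     latex.append("\\end{table}\n")
--
--     return "".join(latex)
-- ===== SOURCE B (Python) =====
-- def create_multirow_table(data, headers, merge_cells, caption, label):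
--     # Grid-stamping: materialise the table as a 2-D grid of cell strings plus
--     # parallel skip/stamped grids, scatter each merge onto the grids (marking
--     # covered cells and overwriting the first-stamped origin in place), then
--     # just print the grid.
--     nrows = len(data)
--     cells = [[str(x) for x in row] for row in data]
--     skip = [[False] * len(row) for row in data]
--     stamped = [[False] * len(row) for row in data]
--
--     for row, col, rs, cs in merge_cells:
--         for r in range(max(row, 0), min(row + rs, nrows)):
--             for c in range(max(col, 0), min(col + cs, len(data[r]))):
--                 if (r, c) != (row, col):
--                     skip[r][c] = True
--         if 0 <= row < nrows and 0 <= col < len(data[row]) and not stamped[row][col]: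
--             stamped[row][col] = True
--             cell = cells[row][col]
--             if rs > 1 and cs > 1:
--                 cells[row][col] = f"\\multirow{{{rs}}}{{*}}{{\\multicolumn{{{cs}}}{{c}}{{{cell}}}}}"
--             elif rs > 1:
--                 cells[row][col] = f"\\multirow{{{rs}}}{{*}}{{{cell}}}"
--             elif cs > 1:
--                 cells[row][col] = f"\\multicolumn{{{cs}}}{{c}}{{{cell}}}"
--
--     out = ["\\begin{table}[htbp]\n",
--            "  \\centering\n",
--            f"  \\caption{{{caption}}}\n",
--            f"  \\label{{tab:{label}}}\n",
--            f"  \\begin{{tabular}}{{{'|'.join(['c'] * len(headers))}}}\n",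
--            "    \\hline\n",
--            "    " + " & ".join(headers) + " \\\\\n",
--            "    \\hline\n"]
--     for r in range(nrows):
--         kept = [cells[r][c] for c in range(len(cells[r])) if not skip[r][c]]
--         out.append("    " + " & ".join(kept) + " \\\\\n")
--         out.append("    \\hline\n")
--     out.append("  \\end{tabular}\n")
--     out.append("\\end{table}\n")
--     return "".join(out)
-- ===== Notes on version B (the rewrite author's own statement) =====
-- stated objective: faster
-- what changed: B renders by materialising a 2-D grid of cell strings with parallel skip/stamped boolean grids and scattering each merge onto the grids in place (ranges clipped to the grid, first stamp wins), then simply prints the grid row by row; A gathers per cell, testing membership in a covered-position set and linearly scanning merge_cells for every cell.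
import Mathlib
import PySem

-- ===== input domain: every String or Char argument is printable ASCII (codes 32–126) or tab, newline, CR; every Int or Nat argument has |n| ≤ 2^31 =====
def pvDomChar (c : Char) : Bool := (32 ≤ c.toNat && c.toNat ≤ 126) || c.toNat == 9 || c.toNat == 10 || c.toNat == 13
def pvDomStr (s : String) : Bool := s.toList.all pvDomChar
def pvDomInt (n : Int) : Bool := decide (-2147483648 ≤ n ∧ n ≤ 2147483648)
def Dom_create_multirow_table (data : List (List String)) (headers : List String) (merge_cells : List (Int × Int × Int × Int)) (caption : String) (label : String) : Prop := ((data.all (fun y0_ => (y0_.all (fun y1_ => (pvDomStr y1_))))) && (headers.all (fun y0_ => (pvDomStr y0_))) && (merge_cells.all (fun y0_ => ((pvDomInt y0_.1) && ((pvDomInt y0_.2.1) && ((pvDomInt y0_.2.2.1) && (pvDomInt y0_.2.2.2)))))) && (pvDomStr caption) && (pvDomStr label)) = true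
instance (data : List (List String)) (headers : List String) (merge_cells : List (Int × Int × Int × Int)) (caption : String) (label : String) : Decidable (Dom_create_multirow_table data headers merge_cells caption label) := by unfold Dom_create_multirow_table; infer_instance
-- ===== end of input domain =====

-- B materialises the table as a 2-D grid of cell strings with parallel skip/stamped grids and
-- scatters each merge onto the grids in place (ranges clipped to the grid), instead of A's
-- per-cell gather through a position set and a linear scan of merge_cells; a timing run
-- measured B faster (A's per-cell scan and unclipped merge areas disappear).

-- ===== PORT A =====
-- the per-cell body of A's rendering loop: find the first merge entry at (i, j), then format
def pvCellA (merge_cells : List (Int × Int × Int × Int)) (i j : Int) (cell : String) : String :=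
  let mergeInfo : Option (Int × Int) :=
    (merge_cells.find? (fun m => m.1 == i && m.2.1 == j)).map (fun m => (m.2.2.1, m.2.2.2))
  match mergeInfo with
  | some rc =>
    if rc.1 > 1 && rc.2 > 1 then
      "\\multirow{" ++ PySem.Int.toStr rc.1 ++ "}{*}{\\multicolumn{" ++ PySem.Int.toStr rc.2 ++ "}{c}{" ++ cell ++ "}}"
    else if rc.1 > 1 then
      "\\multirow{" ++ PySem.Int.toStr rc.1 ++ "}{*}{" ++ cell ++ "}"
    else if rc.2 > 1 then
      "\\multicolumn{" ++ PySem.Int.toStr rc.2 ++ "}{c}{" ++ cell ++ "}"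
    else cell
  | none => cell

def create_multirow_table (data : List (List String)) (headers : List String) (merge_cells : List (Int × Int × Int × Int)) (caption : String) (label : String) : String :=
  let num_cols := headers.length
  let merged : PySem.Set (Int × Int) := merge_cells.foldl (fun s m =>
    (PySem.List.pyRange m.1 (m.1 + m.2.2.1) 1).foldl (fun s r =>
      (PySem.List.pyRange m.2.1 (m.2.1 + m.2.2.2) 1).foldl (fun s c =>
        if (r, c) ≠ (m.1, m.2.1) then PySem.Set.add s (r, c) else s) s) s) PySem.Set.empty
  let dataRows : List String := (PySem.List.enumerate data 0).foldl (fun acc p =>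
    let rowLatex : List String := (PySem.List.enumerate p.2 0).foldl (fun rl q =>
      if PySem.Set.contains merged (p.1, q.1) then rl
      else rl ++ [pvCellA merge_cells p.1 q.1 q.2]) []
    acc ++ ["    " ++ PySem.Str.join " & " rowLatex ++ " \\\\\n", "    \\hline\n"]) []
  PySem.Str.join "" (
    ["\\begin{table}[htbp]\n", "  \\centering\n",
     "  \\caption{" ++ caption ++ "}\n",
     "  \\label{tab:" ++ label ++ "}\n",
     "  \\begin{tabular}{" ++ PySem.Str.join "|" (List.replicate num_cols "c") ++ "}\n",
     "    \\hline\n",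
     "    " ++ PySem.Str.join " & " headers ++ " \\\\\n",
     "    \\hline\n"] ++ dataRows ++ ["  \\end{tabular}\n", "\\end{table}\n"])

-- ===== PORT B =====
-- 2-D grid read/write (Python's g[r][c] and 'g[r][c] = v'; indices are known non-negative and
-- in range at every use site, so Nat indexing via toNat is exact there)
def pvGet2 {α : Type} (g : List (List α)) (r c : Nat) (d : α) : α :=
  (g.getD r []).getD c d

def pvSet2 {α : Type} (g : List (List α)) (r c : Nat) (v : α) : List (List α) :=
  g.set r ((g.getD r []).set c v)

-- the four-way span formatting written into the grid (the trailing 'else cell' is Python's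
-- 'no elif fires, the grid keeps str(cell)')
def pvStampStr (rs cs : Int) (cell : String) : String :=
  if rs > 1 && cs > 1 then
    "\\multirow{" ++ PySem.Int.toStr rs ++ "}{*}{\\multicolumn{" ++ PySem.Int.toStr cs ++ "}{c}{" ++ cell ++ "}}"
  else if rs > 1 then
    "\\multirow{" ++ PySem.Int.toStr rs ++ "}{*}{" ++ cell ++ "}"
  else if cs > 1 then
    "\\multicolumn{" ++ PySem.Int.toStr cs ++ "}{c}{" ++ cell ++ "}"
  else cell

-- mark the covered positions of one merge in the skip grid (ranges clipped to the grid)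
def pvSkipMark (data : List (List String)) (m : Int × Int × Int × Int) (sk : List (List Bool)) : List (List Bool) :=
  (PySem.List.pyRange (max m.1 0) (min (m.1 + m.2.2.1) (data.length : Int)) 1).foldl (fun sk r =>
    (PySem.List.pyRange (max m.2.1 0) (min (m.2.1 + m.2.2.2) ((PySem.List.pyGetD data r []).length : Int)) 1).foldl (fun sk c =>
      if (r, c) ≠ (m.1, m.2.1) then pvSet2 sk r.toNat c.toNat true else sk) sk) sk

-- stamp one merge's origin cell (first stamp wins, recorded in the stamped grid)
def pvStamp (data : List (List String)) (cst : List (List String) × List (List Bool)) (m : Int × Int × Int × Int) : List (List String) × List (List Bool) :=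
  if 0 ≤ m.1 ∧ m.1 < (data.length : Int) ∧ 0 ≤ m.2.1 ∧ m.2.1 < ((PySem.List.pyGetD data m.1 []).length : Int) ∧ pvGet2 cst.2 m.1.toNat m.2.1.toNat false = false then
    (pvSet2 cst.1 m.1.toNat m.2.1.toNat (pvStampStr m.2.2.1 m.2.2.2 (pvGet2 cst.1 m.1.toNat m.2.1.toNat "")),
     pvSet2 cst.2 m.1.toNat m.2.1.toNat true)
  else cst

def create_multirow_table_alt (data : List (List String)) (headers : List String) (merge_cells : List (Int × Int × Int × Int)) (caption : String) (label : String) : String :=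
  let cells0 : List (List String) := data.map (fun row => row.map (fun x => x))
  let skip0 : List (List Bool) := data.map (fun row => List.replicate row.length false)
  let stamped0 : List (List Bool) := data.map (fun row => List.replicate row.length false)
  let st : List (List Bool) × (List (List String) × List (List Bool)) :=
    merge_cells.foldl (fun st m => (pvSkipMark data m st.1, pvStamp data st.2 m)) (skip0, (cells0, stamped0))
  let body : List String := (PySem.List.pyRange 0 (data.length : Int) 1).foldl (fun acc r =>
    let kept : List String :=
      ((PySem.List.pyRange 0 ((PySem.List.pyGetD st.2.1 r []).length : Int) 1).filter
        (fun c => !pvGet2 st.1 r.toNat c.toNat false)).map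
        (fun c => pvGet2 st.2.1 r.toNat c.toNat "")
    acc ++ ["    " ++ PySem.Str.join " & " kept ++ " \\\\\n", "    \\hline\n"]) []
  PySem.Str.join "" (
    ["\\begin{table}[htbp]\n", "  \\centering\n",
     "  \\caption{" ++ caption ++ "}\n",
     "  \\label{tab:" ++ label ++ "}\n",
     "  \\begin{tabular}{" ++ PySem.Str.join "|" (List.replicate headers.length "c") ++ "}\n",
     "    \\hline\n",
     "    " ++ PySem.Str.join " & " headers ++ " \\\\\n",
     "    \\hline\n"] ++ body ++ ["  \\end{tabular}\n", "\\end{table}\n"])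

-- ===== PRECONDITION & SPEC =====
def Spec_create_multirow_table (data : List (List String)) (headers : List String) (merge_cells : List (Int × Int × Int × Int)) (caption : String) (label : String) (out : String) : Prop := out = create_multirow_table_alt data headers merge_cells caption label
instance (data : List (List String)) (headers : List String) (merge_cells : List (Int × Int × Int × Int)) (caption : String) (label : String) (out : String) : Decidable (Spec_create_multirow_table data headers merge_cells caption label out) := by unfold Spec_create_multirow_table; infer_instance

-- ===== CLAIM (what is proved, stated in full; the proofs are below) =====
def Claim_equal_create_multirow_table : Prop := ∀ (data : List (List String)) (headers : List String) (merge_cells : List (Int × Int × Int × Int)) (caption : String) (label : String), Dom_create_multirow_table data headers merge_cells caption label → Spec_create_multirow_table data headers merge_cells caption label (create_multirow_table data headers merge_cells caption label)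

-- ===== LEMMAS AND PROOFS =====


-- ----- 2-D grid basics -----
theorem pvSet2_length {α : Type} (g : List (List α)) (r c : Nat) (v : α) :
    (pvSet2 g r c v).length = g.length := by simp [pvSet2]

theorem pvGetD_eq {α : Type} (l : List α) (n : Nat) (d : α) : l.getD n d = l[n]?.getD d := by
  simp [List.getD_eq_getElem?_getD]

theorem pvSet2_row_length {α : Type} (g : List (List α)) (a b r : Nat) (v : α) :
    ((pvSet2 g a b v).getD r []).length = (g.getD r []).length := by
  simp only [pvSet2, pvGetD_eq, List.getElem?_set]
  split_ifs with h1 h2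
  · subst h1; simp
  · subst h1; simp [List.getElem?_eq_none (Nat.le_of_not_lt h2)]
  · rfl

theorem pvGet2_set2_same {α : Type} (g : List (List α)) (r c : Nat) (v d : α)
    (hr : r < g.length) (hc : c < (g.getD r []).length) :
    pvGet2 (pvSet2 g r c v) r c d = v := by
  have hc' : c < (g[r]?.getD []).length := by simpa [pvGetD_eq] using hc
  simp only [pvGet2, pvSet2, pvGetD_eq, List.getElem?_set, if_pos rfl, if_pos hr,
    Option.getD_some]
  simp [List.getElem?_set, hc']

theorem pvGet2_set2_ne {α : Type} (g : List (List α)) (a b r c : Nat) (v d : α)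
    (h : ¬ (a = r ∧ b = c)) :
    pvGet2 (pvSet2 g a b v) r c d = pvGet2 g r c d := by
  simp only [pvGet2, pvSet2, pvGetD_eq, List.getElem?_set]
  by_cases har : a = r
  · subst har
    have hbc : b ≠ c := fun hb => h ⟨rfl, hb⟩
    rw [if_pos rfl]
    by_cases hlen : a < g.length
    · rw [if_pos hlen]; simp [List.getElem?_set_ne hbc]
    · rw [if_neg hlen]; simp [List.getElem?_eq_none (Nat.le_of_not_lt hlen)]
  · simp [har]

-- shape: a grid has exactly data's row count and row lengths
def pvShape {α : Type} (g : List (List α)) (data : List (List String)) : Prop :=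
  g.length = data.length ∧ ∀ r : Nat, (g.getD r []).length = (data.getD r []).length

theorem pvShape_set2 {α : Type} (g : List (List α)) (data : List (List String)) (r c : Nat) (v : α)
    (h : pvShape g data) : pvShape (pvSet2 g r c v) data :=
  ⟨by rw [pvSet2_length]; exact h.1, fun r' => by rw [pvSet2_row_length]; exact h.2 r'⟩

theorem pvShape_map_init {α : Type} (data : List (List String)) (f : List String → List α)
    (hf : ∀ row, (f row).length = row.length) : pvShape (data.map f) data := by
  refine ⟨by simp, fun r => ?_⟩
  by_cases hr : r < data.length
  · simp [pvGetD_eq, List.getElem?_map, List.getElem?_eq_getElem hr, hf]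
  · simp [pvGetD_eq, List.getElem?_eq_none (by simpa using (Nat.le_of_not_lt hr))]

theorem pvFoldl_pres {γ α : Type} (P : α → Prop) (L : List γ) (f : α → γ → α)
    (hstep : ∀ a x, P a → P (f a x)) : ∀ a, P a → P (L.foldl f a) := by
  induction L with
  | nil => intro a ha; exact ha
  | cons x t ih => intro a ha; exact ih (f a x) (hstep a x ha)

-- ----- skip grid vs A's merged-position set -----
abbrev pvCov (m : Int × Int × Int × Int) (r c : Int) : Prop :=
  m.1 ≤ r ∧ r < m.1 + m.2.2.1 ∧ m.2.1 ≤ c ∧ c < m.2.1 + m.2.2.2 ∧ ¬(r = m.1 ∧ c = m.2.1)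

theorem pvShape_skipMark (data : List (List String)) (m : Int × Int × Int × Int)
    (sk : List (List Bool)) (h : pvShape sk data) : pvShape (pvSkipMark data m sk) data := by
  unfold pvSkipMark
  refine pvFoldl_pres (fun g => pvShape g data) _ _ ?_ sk h
  intro a x ha
  refine pvFoldl_pres (fun g => pvShape g data) _ _ ?_ a ha
  intro a' x' ha'
  split
  · exact pvShape_set2 _ _ _ _ _ ha'
  · exact ha'

theorem pvSkipInner (m : Int × Int × Int × Int) (ri : Int) (r c : Nat) (L : List Int)
    (hri : 0 ≤ ri) (hLn : ∀ x ∈ L, 0 ≤ x) :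
    ∀ sk : List (List Bool), r < sk.length → c < (sk.getD r []).length →
    pvGet2 (L.foldl (fun sk ci => if (ri, ci) ≠ (m.1, m.2.1) then pvSet2 sk ri.toNat ci.toNat true else sk) sk) r c false
    = (pvGet2 sk r c false || decide (∃ ci ∈ L, ¬(ri = m.1 ∧ ci = m.2.1) ∧ ri = (r : Int) ∧ ci = (c : Int))) := by
  induction L with
  | nil => intro sk _ _; simp
  | cons x t ih =>
    intro sk hr hc
    have hx0 : 0 ≤ x := hLn x (by simp)
    have hLt : ∀ y ∈ t, 0 ≤ y := fun y hy => hLn y (by simp [hy])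
    simp only [List.foldl_cons]
    by_cases hcond : (ri, x) ≠ (m.1, m.2.1)
    · rw [if_pos hcond]
      have hlen1 : r < (pvSet2 sk ri.toNat x.toNat true).length := by
        rw [pvSet2_length]; exact hr
      have hlen2 : c < ((pvSet2 sk ri.toNat x.toNat true).getD r []).length := by
        rw [pvSet2_row_length]; exact hc
      rw [ih hLt _ hlen1 hlen2]
      by_cases hpos : ri.toNat = r ∧ x.toNat = c
      · have hr' : ri = (r : Int) := by omega
        have hc' : x = (c : Int) := by omega
        rw [hpos.1, hpos.2, pvGet2_set2_same _ _ _ _ _ hr hc]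
        have hne : ¬(ri = m.1 ∧ x = m.2.1) := by
          intro hh; exact hcond (by simp [hh.1, hh.2])
        have : decide (∃ ci ∈ x :: t, ¬(ri = m.1 ∧ ci = m.2.1) ∧ ri = (r : Int) ∧ ci = (c : Int)) = true := by
          simp only [decide_eq_true_iff]
          exact ⟨x, by simp, hne, hr', hc'⟩
        rw [this]; simp
      · rw [pvGet2_set2_ne _ _ _ _ _ _ _ hpos]
        congr 1
        apply decide_eq_decide.mpr
        constructor
        · rintro ⟨ci, hci, hne, h1, h2⟩; exact ⟨ci, by simp [hci], hne, h1, h2⟩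
        · rintro ⟨ci, hci, hne, h1, h2⟩
          rcases List.mem_cons.mp hci with hcx | hct
          · exfalso; subst hcx; exact hpos ⟨by omega, by omega⟩
          · exact ⟨ci, hct, hne, h1, h2⟩
    · rw [if_neg hcond]
      rw [ih hLt _ hr hc]
      congr 1
      apply decide_eq_decide.mpr
      simp only [ne_eq, not_not, Prod.mk.injEq] at hcond
      constructor
      · rintro ⟨ci, hci, hne, h1, h2⟩; exact ⟨ci, by simp [hci], hne, h1, h2⟩
      · rintro ⟨ci, hci, hne, h1, h2⟩
        rcases List.mem_cons.mp hci with hcx | hct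
        · exfalso; subst hcx; exact hne hcond
        · exact ⟨ci, hct, hne, h1, h2⟩

theorem pvSkipMark_get (data : List (List String)) (m : Int × Int × Int × Int) (r c : Nat)
    (sk : List (List Bool)) (hsh : pvShape sk data)
    (hr : r < data.length) (hc : c < (data.getD r []).length) :
    pvGet2 (pvSkipMark data m sk) r c false
    = (pvGet2 sk r c false || decide (pvCov m (r : Int) (c : Int))) := by
  unfold pvSkipMark
  have key : ∀ L : List Int, (∀ x ∈ L, 0 ≤ x) →
      ∀ sk' : List (List Bool), pvShape sk' data →
      pvGet2 (L.foldl (fun sk ri =>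
        (PySem.List.pyRange (max m.2.1 0) (min (m.2.1 + m.2.2.2) ((PySem.List.pyGetD data ri []).length : Int)) 1).foldl (fun sk ci =>
          if (ri, ci) ≠ (m.1, m.2.1) then pvSet2 sk ri.toNat ci.toNat true else sk) sk) sk') r c false
      = (pvGet2 sk' r c false || decide (∃ ri ∈ L, ∃ ci ∈ PySem.List.pyRange (max m.2.1 0) (min (m.2.1 + m.2.2.2) ((PySem.List.pyGetD data ri []).length : Int)) 1, ¬(ri = m.1 ∧ ci = m.2.1) ∧ ri = (r : Int) ∧ ci = (c : Int))) := by
    intro L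
    induction L with
    | nil => intro _ sk' _; simp
    | cons x t ih =>
      intro hLn sk' hsh'
      have hx0 : 0 ≤ x := hLn x (by simp)
      simp only [List.foldl_cons]
      have hCn : ∀ y ∈ PySem.List.pyRange (max m.2.1 0) (min (m.2.1 + m.2.2.2) ((PySem.List.pyGetD data x []).length : Int)) 1, 0 ≤ y := by
        intro y hy
        have := PySem.List.mem_pyRange_one.mp hy
        omega
      have hsh'' : pvShape ((PySem.List.pyRange (max m.2.1 0) (min (m.2.1 + m.2.2.2) ((PySem.List.pyGetD data x []).length : Int)) 1).foldl (fun sk ci =>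
          if (x, ci) ≠ (m.1, m.2.1) then pvSet2 sk x.toNat ci.toNat true else sk) sk') data := by
        refine pvFoldl_pres (fun g => pvShape g data) _ _ ?_ sk' hsh'
        intro a y ha
        split
        · exact pvShape_set2 _ _ _ _ _ ha
        · exact ha
      rw [ih (fun y hy => hLn y (by simp [hy])) _ hsh'']
      rw [pvSkipInner m x r c _ hx0 hCn sk' (by rw [hsh'.1]; exact hr) (by rw [hsh'.2 r]; exact hc)]
      rw [Bool.or_assoc]
      congr 1
      rw [← Bool.decide_or]
      apply decide_eq_decide.mpr
      constructor
      · rintro (⟨ci, hci, hne, h1, h2⟩ | ⟨ri, hri, hrest⟩)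
        · exact ⟨x, by simp, ci, hci, hne, h1, h2⟩
        · exact ⟨ri, by simp [hri], hrest⟩
      · rintro ⟨ri, hri, hrest⟩
        rcases List.mem_cons.mp hri with hrx | hrt
        · subst hrx; exact Or.inl hrest
        · exact Or.inr ⟨ri, hrt, hrest⟩
  rw [key _ (fun x hx => by have := PySem.List.mem_pyRange_one.mp hx; omega) sk hsh]
  congr 1
  apply decide_eq_decide.mpr
  constructor
  · rintro ⟨ri, hri, ci, hci, hne, h1, h2⟩
    subst h1; subst h2
    have hri' := PySem.List.mem_pyRange_one.mp hri
    have hci' := PySem.List.mem_pyRange_one.mp hci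
    refine ⟨by omega, by omega, by omega, by omega, ?_⟩
    intro hh; exact hne ⟨hh.1, hh.2⟩
  · rintro ⟨h1, h2, h3, h4, h5⟩
    refine ⟨(r : Int), PySem.List.mem_pyRange_one.mpr ⟨by omega, by omega⟩, (c : Int), ?_, ?_, rfl, rfl⟩
    · rw [PySem.List.pyGetD_natCast]
      exact PySem.List.mem_pyRange_one.mpr ⟨by omega, by omega⟩
    · intro hh; exact h5 ⟨hh.1, hh.2⟩

theorem pvSkipFoldAll (data : List (List String)) (l : List (Int × Int × Int × Int)) (r c : Nat)
    (hr : r < data.length) (hc : c < (data.getD r []).length) :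
    ∀ sk : List (List Bool), pvShape sk data →
    pvGet2 (l.foldl (fun sk m => pvSkipMark data m sk) sk) r c false
    = (pvGet2 sk r c false || decide (∃ m ∈ l, pvCov m (r : Int) (c : Int))) := by
  induction l with
  | nil => intro sk _; simp
  | cons m t ih =>
    intro sk hsh
    simp only [List.foldl_cons]
    rw [ih _ (pvShape_skipMark data m sk hsh), pvSkipMark_get data m r c sk hsh hr hc]
    rw [Bool.or_assoc]
    congr 1
    rw [← Bool.decide_or]
    apply decide_eq_decide.mpr
    constructor
    · rintro (h | ⟨m', hm', hcov⟩)
      · exact ⟨m, by simp, h⟩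
      · exact ⟨m', by simp [hm'], hcov⟩
    · rintro ⟨m', hm', hcov⟩
      rcases List.mem_cons.mp hm' with he | ht
      · subst he; exact Or.inl hcov
      · exact Or.inr ⟨m', ht, hcov⟩

-- ----- A's merged-position set, characterised -----
def pvCovered (m : Int × Int × Int × Int) : List (Int × Int) :=
  (PySem.List.pyRange m.1 (m.1 + m.2.2.1) 1).flatMap (fun r =>
    ((PySem.List.pyRange m.2.1 (m.2.1 + m.2.2.2) 1).map (fun c => (r, c))).filter
      (fun p => p ≠ (m.1, m.2.1)))

theorem pvSkipStep (m : Int × Int × Int × Int) (s : PySem.Set (Int × Int)) :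
    (PySem.List.pyRange m.1 (m.1 + m.2.2.1) 1).foldl (fun s r =>
      (PySem.List.pyRange m.2.1 (m.2.1 + m.2.2.2) 1).foldl (fun s c =>
        if (r, c) ≠ (m.1, m.2.1) then PySem.Set.add s (r, c) else s) s) s
      = PySem.Set.update s (pvCovered m) := by
  rw [PySem.Set.update, pvCovered, List.foldl_flatMap]
  apply PySem.List.foldl_congr_mem
  intro acc r _
  rw [List.foldl_filter, List.foldl_map]
  apply PySem.List.foldl_congr_mem
  intro acc' c _
  by_cases h : (r, c) ≠ (m.1, m.2.1) <;> simp [h]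

theorem pvSkipEq (merge_cells : List (Int × Int × Int × Int)) :
    merge_cells.foldl (fun s m =>
      (PySem.List.pyRange m.1 (m.1 + m.2.2.1) 1).foldl (fun s r =>
        (PySem.List.pyRange m.2.1 (m.2.1 + m.2.2.2) 1).foldl (fun s c =>
          if (r, c) ≠ (m.1, m.2.1) then PySem.Set.add s (r, c) else s) s) s) PySem.Set.empty
      = merge_cells.foldl (fun s m => PySem.Set.update s (pvCovered m)) PySem.Set.empty := by
  apply PySem.List.foldl_congr_mem
  intro acc m _
  exact pvSkipStep m acc

theorem mem_pvCovered (m : Int × Int × Int × Int) (ri ci : Int) :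
    (ri, ci) ∈ pvCovered m ↔ pvCov m ri ci := by
  constructor
  · intro h
    rcases List.mem_flatMap.mp h with ⟨r', hr', h2⟩
    rcases List.mem_filter.mp h2 with ⟨h3, h4⟩
    rcases List.mem_map.mp h3 with ⟨c', hc', he⟩
    have e1 : r' = ri := congrArg Prod.fst he
    have e2 : c' = ci := congrArg Prod.snd he
    subst e1; subst e2
    have hr'' := PySem.List.mem_pyRange_one.mp hr'
    have hc'' := PySem.List.mem_pyRange_one.mp hc'
    have h4' : ¬((r', c') = (m.1, m.2.1)) := of_decide_eq_true h4
    refine ⟨by omega, by omega, by omega, by omega, ?_⟩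
    rintro ⟨e1, e2⟩
    exact h4' (by rw [e1, e2])
  · rintro ⟨h1, h2, h3, h4, h5⟩
    refine List.mem_flatMap.mpr ⟨ri, PySem.List.mem_pyRange_one.mpr ⟨h1, h2⟩,
      List.mem_filter.mpr ⟨List.mem_map.mpr ⟨ci, PySem.List.mem_pyRange_one.mpr ⟨h3, h4⟩, rfl⟩, ?_⟩⟩
    simp only [ne_eq, Prod.mk.injEq, decide_eq_true_eq]
    rintro ⟨e1, e2⟩
    exact h5 ⟨e1, e2⟩

theorem pvMemASet (l : List (Int × Int × Int × Int)) (p : Int × Int) :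
    ∀ s : PySem.Set (Int × Int),
    (p ∈ l.foldl (fun s m => PySem.Set.update s (pvCovered m)) s ↔ p ∈ s ∨ ∃ m ∈ l, pvCov m p.1 p.2) := by
  induction l with
  | nil => intro s; simp
  | cons m t ih =>
    intro s
    simp only [List.foldl_cons]
    rw [ih]
    rw [PySem.Set.mem_update]
    constructor
    · rintro ((h | h) | ⟨m', hm', hcov⟩)
      · exact Or.inl h
      · exact Or.inr ⟨m, by simp, (mem_pvCovered m p.1 p.2).mp h⟩
      · exact Or.inr ⟨m', by simp [hm'], hcov⟩
    · rintro (h | ⟨m', hm', hcov⟩)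
      · exact Or.inl (Or.inl h)
      · rcases List.mem_cons.mp hm' with he | ht
        · subst he; exact Or.inl (Or.inr ((mem_pvCovered m' p.1 p.2).mpr hcov))
        · exact Or.inr ⟨m', ht, hcov⟩

theorem pvContains_eq_decide (s : PySem.Set (Int × Int)) (p : Int × Int) :
    PySem.Set.contains s p = decide (p ∈ s) := by
  by_cases h : p ∈ s
  · simp [h, (PySem.Set.contains_iff s p).mpr h]
  · simp only [h, decide_false]
    rcases hb : PySem.Set.contains s p with _ | _
    · rfl
    · exact absurd ((PySem.Set.contains_iff s p).mp hb) h

-- ----- the stamped/cells grids, characterised -----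
def pvOrig (l : List (Int × Int × Int × Int)) (i j : Int) : Option (Int × Int × Int × Int) :=
  l.find? (fun m => m.1 == i && m.2.1 == j)

theorem pvCellA_match (l : List (Int × Int × Int × Int)) (i j : Int) (cell : String) :
    pvCellA l i j cell = (match pvOrig l i j with
      | some m => pvStampStr m.2.2.1 m.2.2.2 cell
      | none => cell) := by
  unfold pvCellA pvOrig pvStampStr
  cases l.find? (fun m => m.1 == i && m.2.1 == j) <;> rfl

theorem pvShape_stamp (data : List (List String)) (cst : List (List String) × List (List Bool))
    (m : Int × Int × Int × Int) (h1 : pvShape cst.1 data) (h2 : pvShape cst.2 data) :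
    pvShape (pvStamp data cst m).1 data ∧ pvShape (pvStamp data cst m).2 data := by
  unfold pvStamp
  split
  · exact ⟨pvShape_set2 _ _ _ _ _ h1, pvShape_set2 _ _ _ _ _ h2⟩
  · exact ⟨h1, h2⟩

theorem pvStampFold (data : List (List String)) (l : List (Int × Int × Int × Int)) (r c : Nat)
    (hr : r < data.length) (hc : c < (data.getD r []).length) :
    ∀ cst : List (List String) × List (List Bool), pvShape cst.1 data → pvShape cst.2 data →
    (pvGet2 (l.foldl (pvStamp data) cst).2 r c false
       = (pvGet2 cst.2 r c false || (pvOrig l (r : Int) (c : Int)).isSome))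
    ∧ pvGet2 (l.foldl (pvStamp data) cst).1 r c ""
       = (if pvGet2 cst.2 r c false = true then pvGet2 cst.1 r c ""
          else match pvOrig l (r : Int) (c : Int) with
            | some m => pvStampStr m.2.2.1 m.2.2.2 (pvGet2 cst.1 r c "")
            | none => pvGet2 cst.1 r c "") := by
  induction l with
  | nil =>
    intro cst _ _
    constructor
    · simp [pvOrig]
    · simp only [List.foldl_nil, pvOrig, List.find?_nil]
      split <;> rfl
  | cons m t ih =>
    intro cst hs1 hs2
    simp only [List.foldl_cons]
    have hstep := pvShape_stamp data cst m hs1 hs2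
    have ihres := ih (pvStamp data cst m) hstep.1 hstep.2
    by_cases horg : m.1 = (r : Int) ∧ m.2.1 = (c : Int)
    · have hpred : (m.1 == (r : Int) && m.2.1 == (c : Int)) = true := by
        simp [horg.1, horg.2]
      have hfind : pvOrig (m :: t) (r : Int) (c : Int) = some m := by
        simp [pvOrig, List.find?_cons, hpred]
      by_cases hst : pvGet2 cst.2 r c false = true
      · have hG : ¬(0 ≤ m.1 ∧ m.1 < (data.length : Int) ∧ 0 ≤ m.2.1 ∧ m.2.1 < ((PySem.List.pyGetD data m.1 []).length : Int) ∧ pvGet2 cst.2 m.1.toNat m.2.1.toNat false = false) := by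
          rintro ⟨-, -, -, -, h5⟩
          rw [show m.1.toNat = r by omega, show m.2.1.toNat = c by omega] at h5
          rw [hst] at h5; cases h5
        have hID : pvStamp data cst m = cst := by unfold pvStamp; rw [if_neg hG]
        rw [hID] at ihres
        rw [hfind, hID]
        refine ⟨?_, ?_⟩
        · rw [ihres.1, hst]; simp
        · rw [ihres.2, if_pos hst, if_pos hst]
      · have hst' : pvGet2 cst.2 r c false = false := by
          rcases hb : pvGet2 cst.2 r c false with _ | _
          · rfl
          · exact absurd hb hst
        have hG : (0 ≤ m.1 ∧ m.1 < (data.length : Int) ∧ 0 ≤ m.2.1 ∧ m.2.1 < ((PySem.List.pyGetD data m.1 []).length : Int) ∧ pvGet2 cst.2 m.1.toNat m.2.1.toNat false = false) := by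
          refine ⟨by omega, by omega, by omega, ?_, ?_⟩
          · rw [horg.1, horg.2, PySem.List.pyGetD_natCast]; exact_mod_cast hc
          · rw [show m.1.toNat = r by omega, show m.2.1.toNat = c by omega]; exact hst'
        have hSTAMP : pvStamp data cst m =
            (pvSet2 cst.1 m.1.toNat m.2.1.toNat (pvStampStr m.2.2.1 m.2.2.2 (pvGet2 cst.1 m.1.toNat m.2.1.toNat "")),
             pvSet2 cst.2 m.1.toNat m.2.1.toNat true) := by
          unfold pvStamp; rw [if_pos hG]
        rw [hSTAMP] at ihres
        have hrn : m.1.toNat = r := by omega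
        have hcn : m.2.1.toNat = c := by omega
        rw [hrn, hcn] at ihres
        rw [hfind, hSTAMP, hrn, hcn]
        have hget2 : pvGet2 (pvSet2 cst.2 r c true) r c false = true :=
          pvGet2_set2_same _ _ _ _ _ (by rw [hs2.1]; exact hr) (by rw [hs2.2 r]; exact hc)
        have hget1 : pvGet2 (pvSet2 cst.1 r c (pvStampStr m.2.2.1 m.2.2.2 (pvGet2 cst.1 r c ""))) r c ""
            = pvStampStr m.2.2.1 m.2.2.2 (pvGet2 cst.1 r c "") :=
          pvGet2_set2_same _ _ _ _ _ (by rw [hs1.1]; exact hr) (by rw [hs1.2 r]; exact hc)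
        refine ⟨?_, ?_⟩
        · rw [ihres.1, hget2, hst']; simp
        · rw [ihres.2, hget2, if_pos rfl, hget1, if_neg (by rw [hst']; simp)]
    · have hpred : (m.1 == (r : Int) && m.2.1 == (c : Int)) = false := by
        rcases e1 : m.1 == (r : Int) with _ | _
        · rfl
        · rcases e2 : m.2.1 == (c : Int) with _ | _
          · rfl
          · exact absurd ⟨by simpa using e1, by simpa using e2⟩ horg
      have hfind : pvOrig (m :: t) (r : Int) (c : Int) = pvOrig t (r : Int) (c : Int) := by
        simp [pvOrig, List.find?_cons, hpred]
      have hagree1 : pvGet2 (pvStamp data cst m).1 r c "" = pvGet2 cst.1 r c "" := by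
        unfold pvStamp
        split
        · next hG =>
          refine pvGet2_set2_ne _ _ _ _ _ _ _ ?_
          rintro ⟨e1, e2⟩
          exact horg ⟨by omega, by omega⟩
        · rfl
      have hagree2 : pvGet2 (pvStamp data cst m).2 r c false = pvGet2 cst.2 r c false := by
        unfold pvStamp
        split
        · next hG =>
          refine pvGet2_set2_ne _ _ _ _ _ _ _ ?_
          rintro ⟨e1, e2⟩
          exact horg ⟨by omega, by omega⟩
        · rfl
      rw [hfind]
      exact ⟨by rw [ihres.1, hagree2], by rw [ihres.2, hagree2, hagree1]⟩

-- ----- the initial grids -----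
theorem pvCells0_eq (data : List (List String)) :
    data.map (fun row => row.map (fun x => x)) = data := by simp

theorem pvGet2_repl_false (data : List (List String)) (r c : Nat) :
    pvGet2 (data.map (fun row => List.replicate row.length false)) r c false = false := by
  unfold pvGet2
  rw [pvGetD_eq, pvGetD_eq, List.getElem?_map]
  by_cases hr : r < data.length
  · rw [List.getElem?_eq_getElem hr]
    simp only [Option.map_some, Option.getD_some]
    rw [List.getElem?_replicate]
    split <;> rfl
  · rw [show data[r]? = none from List.getElem?_eq_none (Nat.le_of_not_lt hr)]
    rfl

theorem pvShape_repl (data : List (List String)) :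
    pvShape (data.map (fun row => List.replicate row.length false)) data :=
  pvShape_map_init data _ (fun row => by simp)

theorem pvFlatMap_congr {α β : Type} (l : List α) (f g : α → List β)
    (h : ∀ x ∈ l, f x = g x) : l.flatMap f = l.flatMap g := by
  induction l with
  | nil => rfl
  | cons x t ih =>
    simp only [List.flatMap_cons]
    rw [h x (by simp), ih (fun y hy => h y (by simp [hy]))]

-- ===== VERDICT (by name: the statement is the Claim_ definition above) =====
theorem create_multirow_table_spec : Claim_equal_create_multirow_table := by
  intro data headers mc cap lab _
  unfold Spec_create_multirow_table create_multirow_table create_multirow_table_alt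
  simp only []
  rw [pvSkipEq, pvCells0_eq]
  rw [PySem.List.foldl_prod_mk (f := fun sk m => pvSkipMark data m sk) (g := fun cst m => pvStamp data cst m)]
  rw [PySem.List.foldl_append_eq_flatMap, PySem.List.foldl_append_eq_flatMap]
  simp only [List.nil_append]
  congr 1
  congr 1
  congr 1
  -- rows lists
  rw [PySem.List.enumerate_eq_map_pyRange data []]
  simp only [PySem.List.len_eq]
  rw [List.flatMap_map]
  apply pvFlatMap_congr
  intro j hj
  obtain ⟨hj0, hjn⟩ := PySem.List.mem_pyRange_one.mp hj
  have hjN : j.toNat < data.length := by omega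
  have hrowe : PySem.List.pyGetD data j [] = data.getD j.toNat [] :=
    PySem.List.pyGetD_of_nonneg data [] hj0
  -- shapes of the final grids
  have hshSk : pvShape (mc.foldl (fun sk m => pvSkipMark data m sk)
      (data.map (fun row => List.replicate row.length false))) data :=
    pvFoldl_pres (fun g => pvShape g data) mc _ (fun a m ha => pvShape_skipMark data m a ha) _ (pvShape_repl data)
  have hshD : pvShape data data := ⟨rfl, fun _ => rfl⟩
  have hshC : pvShape (mc.foldl (pvStamp data) (data, data.map (fun row => List.replicate row.length false))).1 data ∧
      pvShape (mc.foldl (pvStamp data) (data, data.map (fun row => List.replicate row.length false))).2 data :=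
    pvFoldl_pres (fun cst => pvShape cst.1 data ∧ pvShape cst.2 data) mc (pvStamp data)
      (fun a m ha => pvShape_stamp data a m ha.1 ha.2) _ ⟨hshD, pvShape_repl data⟩
  refine congrArg (fun ks => ["    " ++ PySem.Str.join " & " ks ++ " \\\\\n", "    \\hline\n"]) ?_
  -- the A-side per-row loop as filter+map
  have hflip : (PySem.List.enumerate (PySem.List.pyGetD data j []) 0).foldl (fun rl q =>
      if PySem.Set.contains (mc.foldl (fun s m => PySem.Set.update s (pvCovered m)) PySem.Set.empty) (j, q.1) then rl
      else rl ++ [pvCellA mc j q.1 q.2]) []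
      = (PySem.List.enumerate (PySem.List.pyGetD data j []) 0).foldl (fun rl q =>
      if (!PySem.Set.contains (mc.foldl (fun s m => PySem.Set.update s (pvCovered m)) PySem.Set.empty) (j, q.1)) = true
      then rl ++ [pvCellA mc j q.1 q.2] else rl) [] := by
    apply PySem.List.foldl_congr_mem
    intro acc q _
    cases hb : PySem.Set.contains (mc.foldl (fun s m => PySem.Set.update s (pvCovered m)) PySem.Set.empty) (j, q.1) <;> simp [hb]
  rw [hflip, PySem.List.foldl_append_if, List.nil_append]
  rw [PySem.List.enumerate_eq_map_pyRange (PySem.List.pyGetD data j []) "", List.filter_map, List.map_map]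
  simp only [PySem.List.len_eq, hrowe]
  -- align the two range bounds
  have hlenB : ((PySem.List.pyGetD (mc.foldl (pvStamp data) (data, data.map (fun row => List.replicate row.length false))).1 j []).length : Int)
      = ((data.getD j.toNat []).length : Int) := by
    rw [PySem.List.pyGetD_of_nonneg _ _ hj0, hshC.1.2 j.toNat]
  rw [hlenB]
  -- the two filters agree, then the two values agree
  have htest : ∀ x ∈ PySem.List.pyRange 0 ((data.getD j.toNat []).length : Int) 1,
      PySem.Set.contains (mc.foldl (fun s m => PySem.Set.update s (pvCovered m)) PySem.Set.empty) (j, x)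
      = pvGet2 (mc.foldl (fun sk m => pvSkipMark data m sk)
          (data.map (fun row => List.replicate row.length false))) j.toNat x.toNat false := by
    intro x hx
    obtain ⟨hx0, hxn⟩ := PySem.List.mem_pyRange_one.mp hx
    have hxN : x.toNat < (data.getD j.toNat []).length := by omega
    rw [pvContains_eq_decide,
      pvSkipFoldAll data mc j.toNat x.toNat hjN hxN _ (pvShape_repl data), pvGet2_repl_false]
    simp only [Bool.false_or]
    apply decide_eq_decide.mpr
    rw [pvMemASet]
    simp only [Int.toNat_of_nonneg hj0, Int.toNat_of_nonneg hx0]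
    constructor
    · rintro (h | h)
      · simp [PySem.Set.empty] at h
      · exact h
    · exact Or.inr
  have hfilter : (PySem.List.pyRange 0 ((data.getD j.toNat []).length : Int) 1).filter
        ((fun q => !PySem.Set.contains (mc.foldl (fun s m => PySem.Set.update s (pvCovered m)) PySem.Set.empty) (j, q.1)) ∘ (fun c => (c, PySem.List.pyGetD (data.getD j.toNat []) c "")))
      = (PySem.List.pyRange 0 ((data.getD j.toNat []).length : Int) 1).filter
        (fun c => !pvGet2 (mc.foldl (fun sk m => pvSkipMark data m sk)
          (data.map (fun row => List.replicate row.length false))) j.toNat c.toNat false) := by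
    apply List.filter_congr
    intro x hx
    simp only [Function.comp]
    rw [htest x hx]
  rw [hfilter]
  apply List.map_congr_left
  intro x hxf
  have hx := List.mem_of_mem_filter hxf
  obtain ⟨hx0, hxn⟩ := PySem.List.mem_pyRange_one.mp hx
  have hxN : x.toNat < (data.getD j.toNat []).length := by omega
  simp only [Function.comp]
  have hval := (pvStampFold data mc j.toNat x.toNat hjN hxN
    (data, data.map (fun row => List.replicate row.length false)) hshD (pvShape_repl data)).2
  rw [pvGet2_repl_false] at hval
  simp only [Bool.false_eq_true, if_false] at hval
  rw [hval]
  rw [pvCellA_match]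
  have hcell : PySem.List.pyGetD (data.getD j.toNat []) x "" = pvGet2 data j.toNat x.toNat "" := by
    rw [PySem.List.pyGetD_of_nonneg _ _ hx0]; rfl
  rw [hcell]
  simp only [Int.toNat_of_nonneg hj0, Int.toNat_of_nonneg hx0]
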